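-- pv_equiv track=rewrite | github.com/kronenthaler/AdventOfCode | 2022/day23.py | part1
-- ===== SOURCE A (Python) =====
-- from collections import deque
-- from functools import cmp_to_key
--
-- incs = [(-1, 0), (1, 0), (0, -1), (0, 1)]
--
-- neighbors = [
--     [(-1, -1), (-1, 0), (-1, 1)],
--     [(1, -1), (1, 0), (1, 1)],
--     [(-1, -1), (0, -1), (1, -1)],
--     [(-1, 1), (0, 1), (1, 1)],
-- ]
--
-- def check(i, j, elves):
--     for d in range(len(incs)):
--         n = neighbors[d]
--         for x, y in n:
--             if (i + x, j + y) in elves: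
--                 return True
--     return False
--
-- def check_dir(i, j, d, elves):
--     n = neighbors[d]
--     for x, y in n:
--         if (i + x, j + y) in elves:
--             return False
--     return True
--
-- def pos(a, b):
--     x1, y1 = a
--     x2, y2 = b
--     if x1 == x2:
--         return y1 - y2
--     return x1 - x2
--
-- def part1(elves, rounds):
--     dir = deque([0, 1, 2, 3])
--     changed = True
--     round = 0
--
--     while True:
--         if rounds is None:
--             if not changed:
--                 break
--         else:
--             if round >= rounds:
--                 break
--
--         round += 1
--         proposed = {}  # pos, elf
--         unmoved = set()
--
--         # phase 1
--         for i, j in sorted(elves, key=cmp_to_key(pos)):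
--             if check(i, j, elves):
--                 for d in dir:
--                     ni, nj = incs[d]
--                     new_pos = i+ni, j+nj
--                     if check_dir(i, j, d, elves):
--                         proposed[new_pos] = proposed.get(new_pos, []) + [(i,j)]
--                         break
--                 else:
--                      unmoved.add((i,j))
--             else:
--                 unmoved.add((i,j))
--
--         # phase 2
--         new_elves = set()
--         for new_pos, cands in proposed.items():
--             if len(cands) == 1:
--                 new_elves.add(new_pos)
--             else:
--                 for old_pos in cands:
--                     new_elves.add(old_pos)
--
--         new_elves.update(unmoved)
--         changed = len(elves - new_elves) != 0
--
--         elves = new_elves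
--         dir.rotate(-1)
--
--
--     space = list(elves)
--     mini, minj = space[0]
--     maxi, maxj = space[0]
--
--     for i,j in space:
--         mini, minj, maxi, maxj = min(mini, i), min(minj, j), max(maxi, i), max(maxj, j)
--
--     return abs(maxi-mini+1) * abs(maxj-minj+1) - len(elves), round
-- ===== SOURCE B (Python) =====
-- from collections import deque
--
-- incs = [(-1, 0), (1, 0), (0, -1), (0, 1)]
--
-- neighbors = [
--     [(-1, -1), (-1, 0), (-1, 1)],
--     [(1, -1), (1, 0), (1, 1)],
--     [(-1, -1), (0, -1), (1, -1)],
--     [(-1, 1), (0, 1), (1, 1)],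
-- ]
--
-- def check(i, j, elves):
--     for d in range(len(incs)):
--         for x, y in neighbors[d]:
--             if (i + x, j + y) in elves:
--                 return True
--     return False
--
-- def check_dir(i, j, d, elves):
--     for x, y in neighbors[d]:
--         if (i + x, j + y) in elves:
--             return False
--     return True
--
-- def propose(i, j, dirs, elves):
--     """Target this elf proposes, or None (no neighbour, or no free side)."""
--     if not check(i, j, elves):
--         return None
--     for d in dirs:
--         if check_dir(i, j, d, elves):
--             ni, nj = incs[d]
--             return (i + ni, j + nj)
--     return None
--
-- def destination(e, dirs, elves):
--     """Where elf e ends up this round.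
--
--     Geometric collision rule: two distinct elves can propose the same cell t
--     only when they approach it head-on (the cell between them), because a
--     perpendicular proposer would sit inside the other's checked side and block
--     its proposal.  So e's move is cancelled exactly when the elf two cells
--     ahead exists and proposes t as well; no target counting is needed."""
--     i, j = e
--     t = propose(i, j, dirs, elves)
--     if t is None:
--         return e
--     o = (2 * t[0] - i, 2 * t[1] - j)   # the opposite elf, two cells ahead
--     if o in elves and propose(o[0], o[1], dirs, elves) == t:
--         return e
--     return t
--
-- def part1(elves, rounds):
--     dirs = deque([0, 1, 2, 3])
--     changed = True
--     round = 0
--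
--     while True:
--         if rounds is None:
--             if not changed:
--                 break
--         else:
--             if round >= rounds:
--                 break
--         round += 1
--
--         # single pass: each elf's destination is decided locally
--         new_elves = {destination(e, dirs, elves) for e in elves}
--         changed = any(e not in new_elves for e in elves)
--         elves = new_elves
--         dirs.rotate(-1)
--
--     mini = min(i for i, _ in elves)
--     maxi = max(i for i, _ in elves)
--     minj = min(j for _, j in elves)
--     maxj = max(j for _, j in elves)
--     return abs(maxi - mini + 1) * abs(maxj - minj + 1) - len(elves), round
-- ===== Notes on version B (the rewrite author's own statement) =====
-- stated objective: alternative
-- what changed: Each round B drops A's elf sort, the target-keyed dict of candidate lists and the pass over proposed targets: a single pass over the elves decides each elf's destination locally via a geometric head-on collision test (a proposed target can only be contested by the elf two cells ahead proposing it too, since a perpendicular proposer would sit inside the other's checked side), so no counting structure is built at all; the bounding box is computed by four min/max passes instead of one running 4-tuple fold.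
-- outside the precondition, e.g. on part1(set(), None): A raises IndexError, B raises ValueError
import Mathlib
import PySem

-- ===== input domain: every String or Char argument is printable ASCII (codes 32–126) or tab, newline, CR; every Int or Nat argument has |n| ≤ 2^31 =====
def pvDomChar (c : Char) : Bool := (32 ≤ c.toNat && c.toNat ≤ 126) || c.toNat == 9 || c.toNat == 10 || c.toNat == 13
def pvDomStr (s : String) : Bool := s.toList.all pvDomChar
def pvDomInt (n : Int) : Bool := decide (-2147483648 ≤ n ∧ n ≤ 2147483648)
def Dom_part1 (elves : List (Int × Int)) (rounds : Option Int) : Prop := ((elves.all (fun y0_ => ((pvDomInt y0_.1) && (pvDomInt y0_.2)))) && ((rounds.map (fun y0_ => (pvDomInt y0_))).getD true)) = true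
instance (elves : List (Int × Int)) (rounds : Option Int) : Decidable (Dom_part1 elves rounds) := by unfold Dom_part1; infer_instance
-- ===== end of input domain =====

-- B replaces A's per-round sort + target-keyed dict of candidate lists + pass over targets
-- by a single per-elf pass with a geometric head-on collision test (only the elf two cells
-- ahead can contest a proposed target), with no dictionary at all (objective: alternative).
-- Both 'while True' loops are ported with the same large fuel bound, breaking exactly where
-- the Python breaks; equivalence is proved for a nonempty elf set (Pre_).

-- ===== PORT A =====
-- shared module-level helpers (identical in Source A and Source B): incs, neighbors, check, check_dir
def incs : List (Int × Int) := [(-1, 0), (1, 0), (0, -1), (0, 1)]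

def nbrs : List (List (Int × Int)) :=
  [[(-1, -1), (-1, 0), (-1, 1)],
   [(1, -1), (1, 0), (1, 1)],
   [(-1, -1), (0, -1), (1, -1)],
   [(-1, 1), (0, 1), (1, 1)]]

-- check(i, j, elves): True iff some of the 8 neighbours (listed per direction) is an elf
def check (i j : Int) (elves : List (Int × Int)) : Bool :=
  (List.range incs.length).any (fun d =>
    (nbrs.getD d []).any (fun xy => decide ((i + xy.1, j + xy.2) ∈ elves)))

-- check_dir(i, j, d, elves): True iff no elf on the three cells of direction d
def checkDir (i j : Int) (d : Nat) (elves : List (Int × Int)) : Bool :=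
  (nbrs.getD d []).all (fun xy => !decide ((i + xy.1, j + xy.2) ∈ elves))

-- A's inner 'for d in dir: … if check_dir: break / else: unmoved' loop: first free direction's target
def proposeDir (i j : Int) (dir : List Nat) (elves : List (Int × Int)) : Option (Int × Int) :=
  dir.findSome? (fun d =>
    if checkDir i j d elves then
      let inc := incs.getD d (0, 0)
      some (i + inc.1, j + inc.2)
    else none)

-- phase 1 body of A: build proposed : target ↦ candidate list, and the unmoved set
def phase1Step (elves : List (Int × Int)) (dir : List Nat)
    (st : PySem.Dict (Int × Int) (List (Int × Int)) × PySem.Set (Int × Int)) (e : Int × Int) :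
    PySem.Dict (Int × Int) (List (Int × Int)) × PySem.Set (Int × Int) :=
  if check e.1 e.2 elves then
    match proposeDir e.1 e.2 dir elves with
    | some np => (st.1.insert np (st.1.getD np [] ++ [e]), st.2)
    | none => (st.1, PySem.Set.add st.2 e)
  else (st.1, PySem.Set.add st.2 e)

-- phase 2 body of A: sole candidate moves, otherwise all candidates stay
def phase2Step (s : PySem.Set (Int × Int)) (pc : (Int × Int) × List (Int × Int)) :
    PySem.Set (Int × Int) :=
  if pc.2.length == 1 then PySem.Set.add s pc.1
  else pc.2.foldl (fun s old => PySem.Set.add s old) s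

-- one round of A: sort (cmp_to_key pos = lexicographic on (i, j)), phase 1, phase 2, update
def stepA (elves : List (Int × Int)) (dir : List Nat) : List (Int × Int) :=
  let st := (PySem.List.sorted2 elves (fun e => e.1) (fun e => e.2) false).foldl
      (phase1Step elves dir) (PySem.Dict.empty, PySem.Set.empty)
  let newElves := st.1.items.foldl phase2Step PySem.Set.empty
  PySem.Set.update newElves st.2

-- A's 'changed = len(elves - new_elves) != 0'
def changedA (old new : List (Int × Int)) : Bool :=
  (old.filter (fun e => !decide (e ∈ new))).length != 0

-- the loop with rounds = some r: exactly r rounds, the changed flag is never read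
def loopA : Nat → List (Int × Int) → List Nat → List (Int × Int)
  | 0, elves, _ => elves
  | n + 1, elves, dir => loopA n (stepA elves dir) (dir.rotate 1)

-- fuel guard shared by both ports' rounds=None loops, to make the 'while changed'
-- loop total; it only bounds the recursion, the loop breaks where the Python breaks
def fuelCap : Nat := 1000000000

-- the loop with rounds = None: run rounds until not changed (fuel-guarded)
def loopNA : Nat → List (Int × Int) → List Nat → Bool → Nat → List (Int × Int) × Nat
  | 0, elves, _, _, round => (elves, round)
  | fuel + 1, elves, dir, changed, round =>
    if changed then
      let ne := stepA elves dir
      loopNA fuel ne (dir.rotate 1) (changedA elves ne) (round + 1)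
    else (elves, round)

-- bounding box minus elf count, via A's single running (min,min,max,max) fold seeded at space[0]
def boxA (elves : List (Int × Int)) : Int :=
  match elves with
  | [] => 0  -- Python raises IndexError at space[0]; excluded by Pre_
  | s0 :: _ =>
    let m := elves.foldl
      (fun (m : (Int × Int) × (Int × Int)) e =>
        ((min m.1.1 e.1, min m.1.2 e.2), (max m.2.1 e.1, max m.2.2 e.2)))
      ((s0.1, s0.2), (s0.1, s0.2))
    |m.2.1 - m.1.1 + 1| * |m.2.2 - m.1.2 + 1| - elves.length

def part1 (elves : List (Int × Int)) (rounds : Option Int) : Int × Int :=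
  match rounds with
  | none =>  -- the List argument stands for the Python set argument: ofList is the set conversion
    let r := loopNA fuelCap (PySem.Set.ofList elves) [0, 1, 2, 3] true 0
    (boxA r.1, (r.2 : Int))
  | some r =>
    (boxA (loopA r.toNat (PySem.Set.ofList elves) [0, 1, 2, 3]), (r.toNat : Int))

-- ===== PORT B =====
-- Source B's propose(i, j, dirs, elves)
def propose (e : Int × Int) (dir : List Nat) (elves : List (Int × Int)) : Option (Int × Int) :=
  if check e.1 e.2 elves then proposeDir e.1 e.2 dir elves else none

-- Source B's destination(e, dirs, elves): geometric collision rule — e's move to t is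
-- cancelled exactly when the opposite elf two cells ahead exists and proposes t too
def destB (elves : List (Int × Int)) (dir : List Nat) (e : Int × Int) : Int × Int :=
  match propose e dir elves with
  | none => e
  | some t =>
    let o := (2 * t.1 - e.1, 2 * t.2 - e.2)
    if decide (o ∈ elves) && (propose o dir elves == some t) then e else t

-- one round of B: a single pass adding each elf's destination to the new set
def stepB (elves : List (Int × Int)) (dir : List Nat) : List (Int × Int) :=
  elves.foldl (fun s e => PySem.Set.add s (destB elves dir e)) PySem.Set.empty

-- B's 'changed = any(e not in new_elves for e in elves)'
def changedB (old new : List (Int × Int)) : Bool :=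
  old.any (fun e => !decide (e ∈ new))

def loopB : Nat → List (Int × Int) → List Nat → List (Int × Int)
  | 0, elves, _ => elves
  | n + 1, elves, dir => loopB n (stepB elves dir) (dir.rotate 1)

def loopNB : Nat → List (Int × Int) → List Nat → Bool → Nat → List (Int × Int) × Nat
  | 0, elves, _, _, round => (elves, round)
  | fuel + 1, elves, dir, changed, round =>
    if changed then
      let ne := stepB elves dir
      loopNB fuel ne (dir.rotate 1) (changedB elves ne) (round + 1)
    else (elves, round)

-- Source B's four min/max generator passes (min/max of an empty set raise ValueError: Pre_ excludes [])
def boxB (elves : List (Int × Int)) : Int :=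
  let mini := (PySem.List.min? (elves.map (fun e => e.1)) (fun x => x)).getD 0
  let maxi := (PySem.List.max? (elves.map (fun e => e.1)) (fun x => x)).getD 0
  let minj := (PySem.List.min? (elves.map (fun e => e.2)) (fun x => x)).getD 0
  let maxj := (PySem.List.max? (elves.map (fun e => e.2)) (fun x => x)).getD 0
  |maxi - mini + 1| * |maxj - minj + 1| - elves.length

def part1_alt (elves : List (Int × Int)) (rounds : Option Int) : Int × Int :=
  match rounds with
  | none =>  -- same set conversion of the List argument, same fuel guard
    let r := loopNB fuelCap (PySem.Set.ofList elves) [0, 1, 2, 3] true 0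
    (boxB r.1, (r.2 : Int))
  | some r =>
    (boxB (loopB r.toNat (PySem.Set.ofList elves) [0, 1, 2, 3]), (r.toNat : Int))

-- ===== PRECONDITION & SPEC =====
-- Pre_ excludes only the empty elf set, on which both Pythons raise
-- (IndexError at space[0] in A, ValueError at min() in B).
def Pre_part1 (elves : List (Int × Int)) (rounds : Option Int) : Prop :=
  elves ≠ []
instance (elves : List (Int × Int)) (rounds : Option Int) : Decidable (Pre_part1 elves rounds) := by
  unfold Pre_part1; infer_instance

def pvWitness_part1 : (List (Int × Int)) × Option Int := ([(0, 0), (2, 1)], none)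

def Spec_part1 (elves : List (Int × Int)) (rounds : Option Int) (out : Int × Int) : Prop := out = part1_alt elves rounds
instance (elves : List (Int × Int)) (rounds : Option Int) (out : Int × Int) : Decidable (Spec_part1 elves rounds out) := by unfold Spec_part1; infer_instance

-- ===== CLAIM (what is proved, stated in full; the proofs are below) =====
def Claim_equal_part1 : Prop := ∀ (elves : List (Int × Int)) (rounds : Option Int), Dom_part1 elves rounds → Pre_part1 elves rounds → Spec_part1 elves rounds (part1 elves rounds)

-- ===== LEMMAS AND PROOFS =====

-- check/check_dir/propose only read `elves` through membership tests
theorem check_congr (i j : Int) {L L' : List (Int × Int)} (h : ∀ x, x ∈ L ↔ x ∈ L') :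
    check i j L = check i j L' := by
  simp only [check, h]

theorem checkDir_congr (i j : Int) (d : Nat) {L L' : List (Int × Int)} (h : ∀ x, x ∈ L ↔ x ∈ L') :
    checkDir i j d L = checkDir i j d L' := by
  simp only [checkDir, h]

theorem propose_congr (e : Int × Int) (dir : List Nat) {L L' : List (Int × Int)}
    (h : ∀ x, x ∈ L ↔ x ∈ L') : propose e dir L = propose e dir L' := by
  simp only [propose, proposeDir, check_congr _ _ h, checkDir_congr _ _ _ h]

-- group list that A's 'proposed' dict holds at target p: candidates among S in order
theorem phase1_getD (L : List (Int × Int)) (dir : List Nat) :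
    ∀ (S : List (Int × Int))
      (st : PySem.Dict (Int × Int) (List (Int × Int)) × PySem.Set (Int × Int)) (p : Int × Int),
      ((S.foldl (phase1Step L dir) st).1).getD p []
        = st.1.getD p [] ++ S.filter (fun e => propose e dir L == some p) := by
  intro S
  induction S with
  | nil => intro st p; simp
  | cons e S ih =>
    intro st p
    simp only [List.foldl_cons, List.filter_cons]
    by_cases hc : check e.1 e.2 L
    · cases hp : proposeDir e.1 e.2 dir L with
      | none =>
        have hpe : propose e dir L = none := by simp [propose, hc, hp]
        rw [show phase1Step L dir st e = (st.1, PySem.Set.add st.2 e) by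
          simp [phase1Step, hc, hp]]
        rw [ih]
        simp [hpe]
      | some np =>
        have hpe : propose e dir L = some np := by simp [propose, hc, hp]
        rw [show phase1Step L dir st e = (st.1.insert np (st.1.getD np [] ++ [e]), st.2) by
          simp [phase1Step, hc, hp]]
        rw [ih]
        by_cases hnp : np = p
        · subst hnp
          simp [hpe]
        · simp [hpe, PySem.Dict.getD_insert, hnp, Ne.symm hnp]
    · have hpe : propose e dir L = none := by simp [propose, hc]
      rw [show phase1Step L dir st e = (st.1, PySem.Set.add st.2 e) by simp [phase1Step, hc]]
      rw [ih]
      simp [hpe]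

theorem phase1_unmoved_mem (L : List (Int × Int)) (dir : List Nat) :
    ∀ (S : List (Int × Int))
      (st : PySem.Dict (Int × Int) (List (Int × Int)) × PySem.Set (Int × Int)) (q : Int × Int),
      q ∈ (S.foldl (phase1Step L dir) st).2
        ↔ q ∈ st.2 ∨ ∃ e ∈ S, propose e dir L = none ∧ q = e := by
  intro S
  induction S with
  | nil => intro st q; simp
  | cons e S ih =>
    intro st q
    simp only [List.foldl_cons]
    by_cases hc : check e.1 e.2 L
    · cases hp : proposeDir e.1 e.2 dir L with
      | none =>
        have hpe : propose e dir L = none := by simp [propose, hc, hp]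
        rw [show phase1Step L dir st e = (st.1, PySem.Set.add st.2 e) by
          simp [phase1Step, hc, hp]]
        rw [ih]
        simp only [PySem.Set.mem_add, List.mem_cons]
        constructor
        · rintro ((h | h) | ⟨e', he', hn, hq⟩)
          · exact Or.inl h
          · exact Or.inr ⟨e, Or.inl rfl, hpe, h⟩
          · exact Or.inr ⟨e', Or.inr he', hn, hq⟩
        · rintro (h | ⟨e', (rfl | he'), hn, hq⟩)
          · exact Or.inl (Or.inl h)
          · exact Or.inl (Or.inr hq)
          · exact Or.inr ⟨e', he', hn, hq⟩
      | some np =>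
        have hpe : propose e dir L = some np := by simp [propose, hc, hp]
        rw [show phase1Step L dir st e = (st.1.insert np (st.1.getD np [] ++ [e]), st.2) by
          simp [phase1Step, hc, hp]]
        rw [ih]
        simp only [List.mem_cons]
        constructor
        · rintro (h | ⟨e', he', hn, hq⟩)
          · exact Or.inl h
          · exact Or.inr ⟨e', Or.inr he', hn, hq⟩
        · rintro (h | ⟨e', (rfl | he'), hn, hq⟩)
          · exact Or.inl h
          · rw [hpe] at hn; exact absurd hn (by simp)
          · exact Or.inr ⟨e', he', hn, hq⟩
    · have hpe : propose e dir L = none := by simp [propose, hc]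
      rw [show phase1Step L dir st e = (st.1, PySem.Set.add st.2 e) by simp [phase1Step, hc]]
      rw [ih]
      simp only [PySem.Set.mem_add, List.mem_cons]
      constructor
      · rintro ((h | h) | ⟨e', he', hn, hq⟩)
        · exact Or.inl h
        · exact Or.inr ⟨e, Or.inl rfl, hpe, h⟩
        · exact Or.inr ⟨e', Or.inr he', hn, hq⟩
      · rintro (h | ⟨e', (rfl | he'), hn, hq⟩)
        · exact Or.inl (Or.inl h)
        · exact Or.inl (Or.inr hq)
        · exact Or.inr ⟨e', he', hn, hq⟩

theorem phase1_keys_mem (L : List (Int × Int)) (dir : List Nat) :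
    ∀ (S : List (Int × Int))
      (st : PySem.Dict (Int × Int) (List (Int × Int)) × PySem.Set (Int × Int)) (p : Int × Int),
      p ∈ (S.foldl (phase1Step L dir) st).1.keys
        ↔ p ∈ st.1.keys ∨ ∃ e ∈ S, propose e dir L = some p := by
  intro S
  induction S with
  | nil => intro st p; simp
  | cons e S ih =>
    intro st p
    simp only [List.foldl_cons]
    by_cases hc : check e.1 e.2 L
    · cases hp : proposeDir e.1 e.2 dir L with
      | none =>
        have hpe : propose e dir L = none := by simp [propose, hc, hp]
        rw [show phase1Step L dir st e = (st.1, PySem.Set.add st.2 e) by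
          simp [phase1Step, hc, hp]]
        rw [ih]
        simp [hpe]
      | some np =>
        have hpe : propose e dir L = some np := by simp [propose, hc, hp]
        rw [show phase1Step L dir st e = (st.1.insert np (st.1.getD np [] ++ [e]), st.2) by
          simp [phase1Step, hc, hp]]
        rw [ih]
        simp only [PySem.Dict.mem_keys_insert, List.mem_cons]
        constructor
        · rintro ((rfl | h) | ⟨e', he', hn⟩)
          · exact Or.inr ⟨e, Or.inl rfl, by rw [hpe]⟩
          · exact Or.inl h
          · exact Or.inr ⟨e', Or.inr he', hn⟩
        · rintro (h | ⟨e', (rfl | he'), hn⟩)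
          · exact Or.inl (Or.inr h)
          · rw [hpe] at hn; exact Or.inl (Or.inl (Option.some.inj hn).symm)
          · exact Or.inr ⟨e', he', hn⟩
    · have hpe : propose e dir L = none := by simp [propose, hc]
      rw [show phase1Step L dir st e = (st.1, PySem.Set.add st.2 e) by simp [phase1Step, hc]]
      rw [ih]
      simp [hpe]

theorem phase1_keys_nodup (L : List (Int × Int)) (dir : List Nat) :
    ∀ (S : List (Int × Int))
      (st : PySem.Dict (Int × Int) (List (Int × Int)) × PySem.Set (Int × Int)),
      st.1.keys.Nodup → (S.foldl (phase1Step L dir) st).1.keys.Nodup := by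
  intro S
  induction S with
  | nil => intro st h; simpa using h
  | cons e S ih =>
    intro st h
    simp only [List.foldl_cons]
    by_cases hc : check e.1 e.2 L
    · cases hp : proposeDir e.1 e.2 dir L with
      | none =>
        rw [show phase1Step L dir st e = (st.1, PySem.Set.add st.2 e) by
          simp [phase1Step, hc, hp]]
        exact ih _ h
      | some np =>
        rw [show phase1Step L dir st e = (st.1.insert np (st.1.getD np [] ++ [e]), st.2) by
          simp [phase1Step, hc, hp]]
        exact ih _ (PySem.Dict.nodup_keys_insert _ _ _ h)
    · rw [show phase1Step L dir st e = (st.1, PySem.Set.add st.2 e) by simp [phase1Step, hc]]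
      exact ih _ h

theorem nodup_foldl_add {α : Type} [BEq α] [LawfulBEq α] (f : α → α) :
    ∀ (l : List α) (s : PySem.Set α), s.Nodup →
      (l.foldl (fun s x => PySem.Set.add s (f x)) s).Nodup := by
  intro l
  induction l with
  | nil => intro s h; exact h
  | cons x l ih =>
    intro s h
    simp only [List.foldl_cons]
    exact ih _ (PySem.Set.nodup_add _ _ h)

theorem phase2_mem :
    ∀ (items : List ((Int × Int) × List (Int × Int))) (s0 : PySem.Set (Int × Int)) (q : Int × Int),
      q ∈ items.foldl phase2Step s0
        ↔ q ∈ s0 ∨ ∃ pc ∈ items, if pc.2.length = 1 then q = pc.1 else q ∈ pc.2 := by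
  intro items
  induction items with
  | nil => intro s0 q; simp
  | cons pc items ih =>
    intro s0 q
    simp only [List.foldl_cons]
    rw [ih]
    by_cases hl : pc.2.length = 1
    · rw [show phase2Step s0 pc = PySem.Set.add s0 pc.1 by simp [phase2Step, hl]]
      simp only [PySem.Set.mem_add, List.mem_cons]
      constructor
      · rintro ((h | h) | ⟨pc', hm, hp⟩)
        · exact Or.inl h
        · exact Or.inr ⟨pc, Or.inl rfl, by simp [hl, h]⟩
        · exact Or.inr ⟨pc', Or.inr hm, hp⟩
      · rintro (h | ⟨pc', (rfl | hm), hp⟩)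
        · exact Or.inl (Or.inl h)
        · rw [if_pos hl] at hp; exact Or.inl (Or.inr hp)
        · exact Or.inr ⟨pc', hm, hp⟩
    · rw [show phase2Step s0 pc = pc.2.foldl (fun s old => PySem.Set.add s old) s0 by
        simp [phase2Step, hl]]
      rw [show pc.2.foldl (fun s old => PySem.Set.add s old) s0 = PySem.Set.update s0 pc.2
        from rfl]
      simp only [PySem.Set.mem_update, List.mem_cons]
      constructor
      · rintro ((h | h) | ⟨pc', hm, hp⟩)
        · exact Or.inl h
        · exact Or.inr ⟨pc, Or.inl rfl, by simp [hl, h]⟩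
        · exact Or.inr ⟨pc', Or.inr hm, hp⟩
      · rintro (h | ⟨pc', (rfl | hm), hp⟩)
        · exact Or.inl (Or.inl h)
        · rw [if_neg hl] at hp; exact Or.inl (Or.inr hp)
        · exact Or.inr ⟨pc', hm, hp⟩

theorem phase2_nodup :
    ∀ (items : List ((Int × Int) × List (Int × Int))) (s0 : PySem.Set (Int × Int)),
      s0.Nodup → (items.foldl phase2Step s0).Nodup := by
  intro items
  induction items with
  | nil => intro s0 h; exact h
  | cons pc items ih =>
    intro s0 h
    simp only [List.foldl_cons]
    refine ih _ ?_
    unfold phase2Step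
    by_cases hl : pc.2.length == 1
    · simpa [hl] using PySem.Set.nodup_add _ _ h
    · simp only [hl, Bool.false_eq_true, if_false]
      rw [show pc.2.foldl (fun s old => PySem.Set.add s old) s0 = PySem.Set.update s0 pc.2
        from rfl]
      simpa using PySem.Set.nodup_update _ _ h

theorem stepA_mem (L : List (Int × Int)) (dir : List Nat) (q : Int × Int) :
    q ∈ stepA L dir
      ↔ (∃ p, L.filter (fun e => propose e dir L == some p) ≠ [] ∧
            (if (L.filter (fun e => propose e dir L == some p)).length = 1 then q = p
             else q ∈ L.filter (fun e => propose e dir L == some p)))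
        ∨ (q ∈ L ∧ propose q dir L = none) := by
  have hS := PySem.List.sorted2_perm L (fun e => e.1) (fun e => e.2) false
  set S := PySem.List.sorted2 L (fun e => e.1) (fun e => e.2) false with hSdef
  set F := S.foldl (phase1Step L dir) (PySem.Dict.empty, PySem.Set.empty) with hF
  have hkn : F.1.keys.Nodup :=
    phase1_keys_nodup L dir S _ PySem.Dict.nodup_keys_empty
  have hget : ∀ p, F.1.getD p [] = S.filter (fun e => propose e dir L == some p) := by
    intro p
    have := phase1_getD L dir S (PySem.Dict.empty, PySem.Set.empty) p
    simpa using this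
  have hkeys : ∀ p, p ∈ F.1.keys ↔ ∃ e ∈ S, propose e dir L = some p := by
    intro p
    have := phase1_keys_mem L dir S (PySem.Dict.empty, PySem.Set.empty) p
    simpa using this
  have hunm : ∀ x, x ∈ F.2 ↔ ∃ e ∈ S, propose e dir L = none ∧ x = e := by
    intro x
    have := phase1_unmoved_mem L dir S (PySem.Dict.empty, PySem.Set.empty) x
    simpa using this
  have hitems : ∀ pc : (Int × Int) × List (Int × Int),
      pc ∈ F.1.items ↔ (pc.1 ∈ F.1.keys ∧ pc.2 = F.1.getD pc.1 []) := by
    intro pc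
    constructor
    · intro hm
      have hg : F.1.get? pc.1 = some pc.2 :=
        (PySem.Dict.get?_eq_some_iff_mem_items F.1 pc.1 pc.2 hkn).mpr hm
      exact ⟨PySem.Dict.mem_keys_of_mem_items F.1 hm,
        (PySem.Dict.getD_of_get?_eq_some F.1 [] hg).symm⟩
    · rintro ⟨hk, hv⟩
      have hne : F.1.get? pc.1 ≠ none := by
        intro hc
        exact (PySem.Dict.get?_eq_none_iff_not_mem_keys F.1 pc.1).mp hc hk
      obtain ⟨c, hc⟩ := Option.ne_none_iff_exists'.mp hne
      have hg : F.1.get? pc.1 = some pc.2 := by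
        rw [hc, hv, (PySem.Dict.getD_of_get?_eq_some F.1 [] hc)]
      exact (PySem.Dict.get?_eq_some_iff_mem_items F.1 pc.1 pc.2 hkn).mp hg
  have hfp : ∀ p, (S.filter (fun e => propose e dir L == some p)).Perm
      (L.filter (fun e => propose e dir L == some p)) := fun p => hS.filter _
  have hstep : q ∈ stepA L dir ↔
      (q ∈ PySem.Set.empty ∨ ∃ pc ∈ F.1.items,
          if pc.2.length = 1 then q = pc.1 else q ∈ pc.2) ∨ q ∈ F.2 := by
    rw [show stepA L dir = PySem.Set.update (F.1.items.foldl phase2Step PySem.Set.empty) F.2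
      from rfl]
    rw [PySem.Set.mem_update, phase2_mem]
  rw [hstep]
  constructor
  · rintro ((hemp | ⟨pc, hpc, hphi⟩) | hun)
    · simp at hemp
    · obtain ⟨hk, hv⟩ := (hitems pc).mp hpc
      rw [hget] at hv
      refine Or.inl ⟨pc.1, ?_, ?_⟩
      · obtain ⟨e, heS, hpe⟩ := (hkeys pc.1).mp hk
        have : e ∈ L.filter (fun e => propose e dir L == some pc.1) :=
          (hfp pc.1).mem_iff.mp (List.mem_filter.mpr ⟨heS, by simp [hpe]⟩)
        exact List.ne_nil_of_mem this
      · rw [← (hfp pc.1).length_eq, ← hv]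
        rcases Decidable.em (pc.2.length = 1) with hlen | hlen
        · rw [if_pos hlen] at hphi ⊢
          exact hphi
        · rw [if_neg hlen] at hphi ⊢
          rw [hv] at hphi
          exact (hfp pc.1).mem_iff.mp hphi
    · obtain ⟨e, heS, hn, hq⟩ := (hunm q).mp hun
      subst hq
      exact Or.inr ⟨hS.mem_iff.mp heS, hn⟩
  · rintro (⟨p, hne, hif⟩ | ⟨hqL, hqn⟩)
    · obtain ⟨e, heL⟩ := List.exists_mem_of_ne_nil _ hne
      have heS : e ∈ S.filter (fun e => propose e dir L == some p) :=
        (hfp p).mem_iff.mpr heL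
      have hk : p ∈ F.1.keys := by
        rw [hkeys]
        obtain ⟨heS', hp⟩ := List.mem_filter.mp heS
        exact ⟨e, heS', by simpa using hp⟩
      refine Or.inl (Or.inr ⟨(p, F.1.getD p []), (hitems _).mpr ⟨hk, rfl⟩, ?_⟩)
      rw [hget]
      rw [← (hfp p).length_eq] at hif
      rcases Decidable.em ((S.filter (fun e => propose e dir L == some p)).length = 1) with
        hlen | hlen
      · rw [if_pos hlen] at hif ⊢
        exact hif
      · rw [if_neg hlen] at hif ⊢
        exact (hfp p).mem_iff.mpr hif
    · exact Or.inr ((hunm q).mpr ⟨q, hS.mem_iff.mpr hqL, hqn, rfl⟩)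

theorem stepA_nodup (L : List (Int × Int)) (dir : List Nat) : (stepA L dir).Nodup := by
  exact PySem.Set.nodup_update _ _ (phase2_nodup _ _ List.nodup_nil)

-- what propose = some t tells us: a direction d ∈ dir with a free side and t one step along d
theorem propose_spec {e : Int × Int} {dir : List Nat} {L : List (Int × Int)} {t : Int × Int}
    (h : propose e dir L = some t) :
    ∃ d ∈ dir, checkDir e.1 e.2 d L = true ∧
      t = (e.1 + (incs.getD d (0, 0)).1, e.2 + (incs.getD d (0, 0)).2) := by
  unfold propose at h
  by_cases hc : check e.1 e.2 L
  · rw [if_pos hc] at h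
    unfold proposeDir at h
    obtain ⟨d, hd, hf⟩ := List.exists_of_findSome?_eq_some h
    by_cases hcd : checkDir e.1 e.2 d L
    · rw [if_pos hcd] at hf
      exact ⟨d, hd, hcd, (Option.some.inj hf).symm⟩
    · rw [if_neg hcd] at hf; cases hf
  · rw [if_neg hc] at h; cases h

-- a passing side check forbids an elf on any of that side's three cells
theorem checkDir_not_mem {i j : Int} {d : Nat} {L : List (Int × Int)}
    (h : checkDir i j d L = true) :
    ∀ xy ∈ nbrs.getD d [], (i + xy.1, j + xy.2) ∉ L := by
  intro xy hxy hmem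
  have := (List.all_eq_true.mp h) xy hxy
  simp [hmem] at this

-- KEY GEOMETRIC FACT: two distinct elves proposing the same target approach it head-on,
-- so the second one is the point reflection of the first through the target
theorem proposers_opposite {dir : List Nat} {L : List (Int × Int)} {x y t : Int × Int}
    (hdir : ∀ d ∈ dir, d < 4) (hxL : x ∈ L) (hyL : y ∈ L) (hxy : x ≠ y)
    (hx : propose x dir L = some t) (hy : propose y dir L = some t) :
    y = (2 * t.1 - x.1, 2 * t.2 - x.2) := by
  obtain ⟨d1, hd1, hcd1, ht1⟩ := propose_spec hx
  obtain ⟨d2, hd2, hcd2, ht2⟩ := propose_spec hy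
  have hb1 := hdir d1 hd1
  have hb2 := hdir d2 hd2
  obtain ⟨x1, x2⟩ := x
  obtain ⟨y1, y2⟩ := y
  obtain ⟨t1, t2⟩ := t
  simp only [Prod.mk.injEq] at ht1 ht2 ⊢
  have hxyne : ¬(x1 = y1 ∧ x2 = y2) := by
    intro h; exact hxy (by simp [h.1, h.2])
  interval_cases d1 <;> interval_cases d2 <;>
    simp only [incs, List.getD, List.getElem?_cons_zero, List.getElem?_cons_succ,
      Option.getD_some] at ht1 ht2 hcd1 hcd2 <;>
    first
      | (exact absurd (by omega : x1 = y1 ∧ x2 = y2) hxyne)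
      | (constructor <;> omega)
      | (exact absurd hyL (by
          have h3 := checkDir_not_mem hcd1
          first
            | (have hcell := h3 (-1, -1) (by simp [nbrs])
               have hy' : ((y1, y2) : Int × Int) = (x1 + (-1 : Int), x2 + (-1 : Int)) := by
                 simp only [Prod.mk.injEq]; constructor <;> omega
               rw [hy']; exact hcell)
            | (have hcell := h3 (-1, 1) (by simp [nbrs])
               have hy' : ((y1, y2) : Int × Int) = (x1 + (-1 : Int), x2 + (1 : Int)) := by
                 simp only [Prod.mk.injEq]; constructor <;> omega
               rw [hy']; exact hcell)
            | (have hcell := h3 (1, -1) (by simp [nbrs])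
               have hy' : ((y1, y2) : Int × Int) = (x1 + (1 : Int), x2 + (-1 : Int)) := by
                 simp only [Prod.mk.injEq]; constructor <;> omega
               rw [hy']; exact hcell)
            | (have hcell := h3 (1, 1) (by simp [nbrs])
               have hy' : ((y1, y2) : Int × Int) = (x1 + (1 : Int), x2 + (1 : Int)) := by
                 simp only [Prod.mk.injEq]; constructor <;> omega
               rw [hy']; exact hcell)))

-- hence: the proposal of e ∈ L is uncontested iff the opposite elf does not claim it too
theorem unique_proposer {dir : List Nat} {L : List (Int × Int)} {e t : Int × Int}
    (hnd : L.Nodup) (hdir : ∀ d ∈ dir, d < 4) (heL : e ∈ L)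
    (hpe : propose e dir L = some t) :
    (L.filter (fun x => propose x dir L == some t)).length = 1
      ↔ ¬((2 * t.1 - e.1, 2 * t.2 - e.2) ∈ L ∧
          propose (2 * t.1 - e.1, 2 * t.2 - e.2) dir L = some t) := by
  have heF : e ∈ L.filter (fun x => propose x dir L == some t) :=
    List.mem_filter.mpr ⟨heL, by simp [hpe]⟩
  have hFnd : (L.filter (fun x => propose x dir L == some t)).Nodup := hnd.filter _
  have hoe : (2 * t.1 - e.1, 2 * t.2 - e.2) ≠ e := by
    obtain ⟨d, hd, _, ht⟩ := propose_spec hpe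
    have hb := hdir d hd
    intro hcontra
    have h1 : 2 * t.1 - e.1 = e.1 := congrArg Prod.fst hcontra
    have h2 : 2 * t.2 - e.2 = e.2 := congrArg Prod.snd hcontra
    have ht1 : t.1 = e.1 + (incs.getD d (0, 0)).1 := congrArg Prod.fst ht
    have ht2 : t.2 = e.2 + (incs.getD d (0, 0)).2 := congrArg Prod.snd ht
    interval_cases d <;>
      simp only [incs, List.getD, List.getElem?_cons_zero, List.getElem?_cons_succ,
        Option.getD_some] at ht1 ht2 <;> omega
  constructor
  · intro hlen hcontra
    obtain ⟨a, hFa⟩ := List.length_eq_one_iff.mp hlen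
    have hea : e = a := by have := hFa ▸ heF; simpa using this
    have hoF : (2 * t.1 - e.1, 2 * t.2 - e.2) ∈ L.filter (fun x => propose x dir L == some t) :=
      List.mem_filter.mpr ⟨hcontra.1, by simp [hcontra.2]⟩
    have hoa : (2 * t.1 - e.1, 2 * t.2 - e.2) = a := by have := hFa ▸ hoF; simpa using this
    exact hoe (hoa.trans hea.symm)
  · intro hno
    by_contra hlen
    have hge : 2 ≤ (L.filter (fun x => propose x dir L == some t)).length := by
      have h1 : 0 < (L.filter (fun x => propose x dir L == some t)).length :=
        List.length_pos_of_mem heF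
      omega
    -- a Nodup list of length ≥ 2 containing e has a member ≠ e
    have hex : ∃ x ∈ L.filter (fun x => propose x dir L == some t), x ≠ e := by
      by_contra hall
      push Not at hall
      have hcnt : (L.filter (fun x => propose x dir L == some t)).length =
          (L.filter (fun x => propose x dir L == some t)).count e :=
        (List.count_eq_length.mpr (fun b hb => (hall b hb).symm)).symm
      have hc1 := List.nodup_iff_count_le_one.mp hFnd e
      omega
    obtain ⟨x, hxF, hxe⟩ := hex
    obtain ⟨hxL, hxp⟩ := List.mem_filter.mp hxF
    have hxp' : propose x dir L = some t := by simpa using hxp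
    have hopp := proposers_opposite hdir heL hxL (Ne.symm hxe) hpe hxp'
    exact hno ⟨hopp ▸ hxL, hopp ▸ hxp'⟩

-- membership in B's new set: the destinations of the elves
theorem stepB_mem (L : List (Int × Int)) (dir : List Nat) (q : Int × Int) :
    q ∈ stepB L dir ↔ ∃ e ∈ L, q = destB L dir e := by
  unfold stepB
  rw [← PySem.Set.update_map_eq_foldl_add]
  simp only [PySem.Set.mem_update, List.mem_map]
  constructor
  · rintro (h | ⟨e, he, rfl⟩)
    · simp at h
    · exact ⟨e, he, rfl⟩
  · rintro ⟨e, he, rfl⟩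
    exact Or.inr ⟨e, he, rfl⟩

theorem stepB_nodup (L : List (Int × Int)) (dir : List Nat) : (stepB L dir).Nodup :=
  nodup_foldl_add _ L PySem.Set.empty (by simp)

theorem stepB_ne_nil (L : List (Int × Int)) (dir : List Nat) (h : L ≠ []) :
    stepB L dir ≠ [] := by
  match L, h with
  | e :: t, _ =>
    have hm : destB (e :: t) dir e ∈ stepB (e :: t) dir :=
      (stepB_mem _ _ _).mpr ⟨e, by simp, rfl⟩
    exact List.ne_nil_of_mem hm

-- A's new set, re-read as the image of a per-elf destination function
theorem stepA_mem' (L : List (Int × Int)) (dir : List Nat) (q : Int × Int) :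
    q ∈ stepA L dir
      ↔ ∃ e ∈ L, q = (match propose e dir L with
          | none => e
          | some t =>
            if (L.filter (fun x => propose x dir L == some t)).length = 1 then t else e) := by
  rw [stepA_mem]
  constructor
  · rintro (⟨p, hne, hif⟩ | ⟨hqL, hqn⟩)
    · by_cases hlen : (L.filter (fun x => propose x dir L == some p)).length = 1
      · rw [if_pos hlen] at hif
        subst hif
        obtain ⟨a, ha⟩ := List.length_eq_one_iff.mp hlen
        have haF : a ∈ L.filter (fun x => propose x dir L == some q) := by rw [ha]; simp
        obtain ⟨haL, hap⟩ := List.mem_filter.mp haF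
        refine ⟨a, haL, ?_⟩
        have hap' : propose a dir L = some q := by simpa using hap
        rw [hap']
        simp [hlen]
      · rw [if_neg hlen] at hif
        obtain ⟨hqL2, hqp⟩ := List.mem_filter.mp hif
        refine ⟨q, hqL2, ?_⟩
        have hqp' : propose q dir L = some p := by simpa using hqp
        rw [hqp']
        simp [hlen]
    · exact ⟨q, hqL, by rw [hqn]⟩
  · rintro ⟨e, heL, rfl⟩
    cases hp : propose e dir L with
    | none => exact Or.inr ⟨heL, hp⟩
    | some t =>
      have heF : e ∈ L.filter (fun x => propose x dir L == some t) :=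
        List.mem_filter.mpr ⟨heL, by simp [hp]⟩
      refine Or.inl ⟨t, List.ne_nil_of_mem heF, ?_⟩
      by_cases hlen : (L.filter (fun x => propose x dir L == some t)).length = 1
      · simp [hlen]
      · simpa [hlen] using heF

-- the same new set from both rounds (A over La, B over the permuted Nodup Lb)
theorem step_mem_iff (La Lb : List (Int × Int)) (dir : List Nat) (hp : La.Perm Lb)
    (hnd : Lb.Nodup) (hdir : ∀ d ∈ dir, d < 4) (q : Int × Int) :
    q ∈ stepA La dir ↔ q ∈ stepB Lb dir := by
  have hmm : ∀ x : Int × Int, x ∈ La ↔ x ∈ Lb := fun x => hp.mem_iff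
  have hpc : ∀ e, propose e dir La = propose e dir Lb := fun e => propose_congr e dir hmm
  have hfil : ∀ t, (La.filter (fun x => propose x dir La == some t)).length
      = (Lb.filter (fun x => propose x dir Lb == some t)).length := by
    intro t
    rw [show (fun x => propose x dir La == some t) = (fun x => propose x dir Lb == some t)
      from funext fun x => by rw [hpc]]
    exact (hp.filter _).length_eq
  rw [stepA_mem' La dir q, stepB_mem Lb dir q]
  have hdest : ∀ e ∈ Lb, (match propose e dir La with
      | none => e
      | some t =>
        if (La.filter (fun x => propose x dir La == some t)).length = 1 then t else e)
      = destB Lb dir e := by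
    intro e heLb
    unfold destB
    rw [hpc]
    cases hpe : propose e dir Lb with
    | none => rfl
    | some t =>
      simp only
      rw [hfil]
      have hiff := unique_proposer hnd hdir heLb hpe
      by_cases hlen : (Lb.filter (fun x => propose x dir Lb == some t)).length = 1
      · rw [if_pos hlen]
        have hno := hiff.mp hlen
        have hcond : (decide ((2 * t.1 - e.1, 2 * t.2 - e.2) ∈ Lb)
            && (propose (2 * t.1 - e.1, 2 * t.2 - e.2) dir Lb == some t)) = false := by
          by_contra hb
          have hT := Bool.and_eq_true _ _ ▸ (Bool.of_not_eq_false hb)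
          exact hno ⟨by simpa using hT.1, by simpa using hT.2⟩
        rw [hcond]
        simp
      · rw [if_neg hlen]
        have hyes : (2 * t.1 - e.1, 2 * t.2 - e.2) ∈ Lb ∧
            propose (2 * t.1 - e.1, 2 * t.2 - e.2) dir Lb = some t := by
          by_contra hno
          exact hlen (hiff.mpr hno)
        have hcond : (decide ((2 * t.1 - e.1, 2 * t.2 - e.2) ∈ Lb)
            && (propose (2 * t.1 - e.1, 2 * t.2 - e.2) dir Lb == some t)) = true := by
          simp [hyes.1, hyes.2]
        rw [hcond]
        simp
  constructor
  · rintro ⟨e, heLa, rfl⟩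
    exact ⟨e, (hmm e).mp heLa, hdest e ((hmm e).mp heLa)⟩
  · rintro ⟨e, heLb, rfl⟩
    exact ⟨e, (hmm e).mpr heLb, (hdest e heLb).symm⟩

theorem step_perm (La Lb : List (Int × Int)) (dir : List Nat) (hp : La.Perm Lb)
    (hnd : Lb.Nodup) (hdir : ∀ d ∈ dir, d < 4) :
    (stepA La dir).Perm (stepB Lb dir) := by
  rw [List.perm_ext_iff_of_nodup (stepA_nodup La dir) (stepB_nodup Lb dir)]
  exact step_mem_iff La Lb dir hp hnd hdir

-- the changed flags agree on permuted states
theorem changed_eq (La Lb Na Nb : List (Int × Int)) (hp : La.Perm Lb) (hn : Na.Perm Nb) :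
    changedA La Na = changedB Lb Nb := by
  unfold changedA changedB
  have h1 : ((La.filter (fun e => !decide (e ∈ Na))).length != 0)
      = La.any (fun e => !decide (e ∈ Na)) := by
    cases hany : La.any (fun e => !decide (e ∈ Na)) with
    | true =>
      obtain ⟨e, he, hne⟩ := List.any_eq_true.mp hany
      have hmem : e ∈ La.filter (fun e => !decide (e ∈ Na)) := List.mem_filter.mpr ⟨he, hne⟩
      have hpos := List.length_pos_of_mem hmem
      simp [Nat.pos_iff_ne_zero.mp hpos]
    | false =>
      have hnil : La.filter (fun e => !decide (e ∈ Na)) = [] := by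
        rw [List.filter_eq_nil_iff]
        intro e he
        have := List.any_eq_false.mp hany e he
        simpa using this
      simp [hnil]
  rw [h1]
  have h2 : (fun e : Int × Int => !decide (e ∈ Na)) = (fun e => !decide (e ∈ Nb)) :=
    funext fun e => by simp [hn.mem_iff]
  rw [h2]
  exact List.Perm.any_eq hp

theorem rotate_dir (dir : List Nat) (hdir : ∀ d ∈ dir, d < 4) :
    ∀ d ∈ dir.rotate 1, d < 4 := fun d hd => hdir d ((List.rotate_perm dir 1).mem_iff.mp hd)

theorem loop_perm : ∀ (n : Nat) (La Lb : List (Int × Int)) (dir : List Nat), La.Perm Lb →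
    Lb.Nodup → (∀ d ∈ dir, d < 4) → (loopA n La dir).Perm (loopB n Lb dir) := by
  intro n
  induction n with
  | zero => intro La Lb dir hp _ _; exact hp
  | succ n ih =>
    intro La Lb dir hp hnd hdir
    exact ih _ _ _ (step_perm La Lb dir hp hnd hdir) (stepB_nodup Lb dir) (rotate_dir dir hdir)

theorem loopN_perm : ∀ (fuel : Nat) (La Lb : List (Int × Int)) (dir : List Nat) (c : Bool)
    (round : Nat), La.Perm Lb → Lb.Nodup → (∀ d ∈ dir, d < 4) →
    (loopNA fuel La dir c round).1.Perm (loopNB fuel Lb dir c round).1 ∧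
      (loopNA fuel La dir c round).2 = (loopNB fuel Lb dir c round).2 := by
  intro fuel
  induction fuel with
  | zero => intro La Lb dir c round hp _ _; exact ⟨hp, rfl⟩
  | succ fuel ih =>
    intro La Lb dir c round hp hnd hdir
    cases c with
    | false => exact ⟨hp, rfl⟩
    | true =>
      simp only [loopNA, loopNB, if_pos]
      have hstep := step_perm La Lb dir hp hnd hdir
      have hch : changedA La (stepA La dir) = changedB Lb (stepB Lb dir) :=
        changed_eq La Lb _ _ hp hstep
      rw [hch]
      exact ih _ _ _ _ _ hstep (stepB_nodup Lb dir) (rotate_dir dir hdir)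

theorem loopB_ne_nil : ∀ (n : Nat) (L : List (Int × Int)) (dir : List Nat), L ≠ [] →
    loopB n L dir ≠ [] := by
  intro n
  induction n with
  | zero => intro L dir h; exact h
  | succ n ih =>
    intro L dir h
    exact ih _ _ (stepB_ne_nil L dir h)

theorem loopNB_ne_nil : ∀ (fuel : Nat) (L : List (Int × Int)) (dir : List Nat) (c : Bool)
    (round : Nat), L ≠ [] → (loopNB fuel L dir c round).1 ≠ [] := by
  intro fuel
  induction fuel with
  | zero => intro L dir c round h; exact h
  | succ fuel ih =>
    intro L dir c round h
    cases c with
    | false => exact h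
    | true =>
      simp only [loopNB, if_pos]
      exact ih _ _ _ _ (stepB_ne_nil L dir h)

theorem foldl_min_eq (e e' : Int) (l l' : List Int)
    (h : ∀ x, x ∈ e :: l ↔ x ∈ e' :: l') : l.foldl min e = l'.foldl min e' := by
  have h1 := PySem.List.min?_id_cons e l
  have h2 := PySem.List.min?_id_cons e' l'
  have m1 := PySem.List.min?_mem h1
  have m2 := PySem.List.min?_mem h2
  have b1 := PySem.List.min?_isMin h1
  have b2 := PySem.List.min?_isMin h2
  exact le_antisymm (b1 _ ((h _).mpr m2)) (b2 _ ((h _).mp m1))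

theorem foldl_max_eq (e e' : Int) (l l' : List Int)
    (h : ∀ x, x ∈ e :: l ↔ x ∈ e' :: l') : l.foldl max e = l'.foldl max e' := by
  have h1 := PySem.List.max?_id_cons e l
  have h2 := PySem.List.max?_id_cons e' l'
  have m1 := PySem.List.max?_mem h1
  have m2 := PySem.List.max?_mem h2
  have b1 := PySem.List.max?_isMax h1
  have b2 := PySem.List.max?_isMax h2
  exact le_antisymm (b2 _ ((h _).mp m1)) (b1 _ ((h _).mpr m2))

theorem foldl_box_split :
    ∀ (l : List (Int × Int)) (m : (Int × Int) × (Int × Int)),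
      l.foldl (fun (m : (Int × Int) × (Int × Int)) e =>
          ((min m.1.1 e.1, min m.1.2 e.2), (max m.2.1 e.1, max m.2.2 e.2))) m
        = (((l.map (fun e => e.1)).foldl min m.1.1, (l.map (fun e => e.2)).foldl min m.1.2),
           ((l.map (fun e => e.1)).foldl max m.2.1, (l.map (fun e => e.2)).foldl max m.2.2)) := by
  intro l
  induction l with
  | nil => intro m; rfl
  | cons e l ih =>
    intro m
    simp only [List.foldl_cons, List.map_cons]
    rw [ih]

theorem box_eq (a b : List (Int × Int)) (hp : a.Perm b) (ha : a ≠ []) :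
    boxA a = boxB b := by
  rcases a with _ | ⟨h, ta⟩
  · exact absurd rfl ha
  rcases b with _ | ⟨h', tb⟩
  · exact absurd (List.Perm.eq_nil hp) ha
  · dsimp only [boxA, boxB]
    rw [foldl_box_split]
    have hmapf : ((h :: ta).map (fun e => e.1)).Perm ((h' :: tb).map (fun e => e.1)) :=
      hp.map _
    have hmaps : ((h :: ta).map (fun e => e.2)).Perm ((h' :: tb).map (fun e => e.2)) :=
      hp.map _
    have hminf : ((h :: ta).map (fun e => e.1)).foldl min h.1 = (tb.map (fun e => e.1)).foldl min h'.1 := by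
      apply foldl_min_eq
      intro x
      constructor
      · intro hx
        rcases List.mem_cons.mp hx with h1 | h1
        · subst h1; exact hmapf.mem_iff.mp (by simp)
        · exact hmapf.mem_iff.mp h1
      · intro hx
        exact List.mem_cons_of_mem _ (hmapf.mem_iff.mpr hx)
    have hmins : ((h :: ta).map (fun e => e.2)).foldl min h.2 = (tb.map (fun e => e.2)).foldl min h'.2 := by
      apply foldl_min_eq
      intro x
      constructor
      · intro hx
        rcases List.mem_cons.mp hx with h1 | h1
        · subst h1; exact hmaps.mem_iff.mp (by simp)
        · exact hmaps.mem_iff.mp h1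
      · intro hx
        exact List.mem_cons_of_mem _ (hmaps.mem_iff.mpr hx)
    have hmaxf : ((h :: ta).map (fun e => e.1)).foldl max h.1 = (tb.map (fun e => e.1)).foldl max h'.1 := by
      apply foldl_max_eq
      intro x
      constructor
      · intro hx
        rcases List.mem_cons.mp hx with h1 | h1
        · subst h1; exact hmapf.mem_iff.mp (by simp)
        · exact hmapf.mem_iff.mp h1
      · intro hx
        exact List.mem_cons_of_mem _ (hmapf.mem_iff.mpr hx)
    have hmaxs : ((h :: ta).map (fun e => e.2)).foldl max h.2 = (tb.map (fun e => e.2)).foldl max h'.2 := by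
      apply foldl_max_eq
      intro x
      constructor
      · intro hx
        rcases List.mem_cons.mp hx with h1 | h1
        · subst h1; exact hmaps.mem_iff.mp (by simp)
        · exact hmaps.mem_iff.mp h1
      · intro hx
        exact List.mem_cons_of_mem _ (hmaps.mem_iff.mpr hx)
    rw [show ((h' :: tb).map (fun e => e.1)) = h'.1 :: tb.map (fun e => e.1) from rfl] at *
    rw [show ((h' :: tb).map (fun e => e.2)) = h'.2 :: tb.map (fun e => e.2) from rfl] at *
    simp only [PySem.List.min?_id_cons, PySem.List.max?_id_cons, Option.getD_some]
    rw [hminf, hmins, hmaxf, hmaxs, hp.length_eq]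

-- ===== VERDICT (by name: the statement is the Claim_ definition above) =====
theorem part1_spec : Claim_equal_part1 := by
  intro elves rounds _dom hpre
  unfold Spec_part1
  have hone : PySem.Set.ofList elves ≠ [] := by
    match elves, hpre with
    | e :: t, _ =>
      exact List.ne_nil_of_mem ((PySem.Set.mem_ofList (e :: t) e).mpr (by simp))
  have hnd : (PySem.Set.ofList elves).Nodup := PySem.Set.nodup_ofList elves
  have hdir : ∀ d ∈ ([0, 1, 2, 3] : List Nat), d < 4 := by
    intro d hd
    have h4 : d = 0 ∨ d = 1 ∨ d = 2 ∨ d = 3 := by simpa using hd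
    omega
  match rounds with
  | none =>
    have hN := loopN_perm fuelCap (PySem.Set.ofList elves) (PySem.Set.ofList elves)
      [0, 1, 2, 3] true 0 (List.Perm.refl _) hnd hdir
    have hbne : (loopNB fuelCap (PySem.Set.ofList elves) [0, 1, 2, 3] true 0).1 ≠ [] :=
      loopNB_ne_nil _ _ _ _ _ hone
    have hane : (loopNA fuelCap (PySem.Set.ofList elves) [0, 1, 2, 3] true 0).1 ≠ [] := by
      intro h0; rw [h0] at hN; exact hbne (List.Perm.nil_eq hN.1).symm
    simp only [part1, part1_alt]
    rw [box_eq _ _ hN.1 hane, hN.2]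
  | some r =>
    have hperm := loop_perm r.toNat (PySem.Set.ofList elves) (PySem.Set.ofList elves)
      [0, 1, 2, 3] (List.Perm.refl _) hnd hdir
    have hbne : loopB r.toNat (PySem.Set.ofList elves) [0, 1, 2, 3] ≠ [] :=
      loopB_ne_nil _ _ _ hone
    have hane : loopA r.toNat (PySem.Set.ofList elves) [0, 1, 2, 3] ≠ [] := by
      intro h0; rw [h0] at hperm; exact hbne (List.Perm.nil_eq hperm).symm
    simp only [part1, part1_alt]
    exact congrArg (fun x => (x, (r.toNat : Int))) (box_eq _ _ hperm hane)
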